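-- pv_equiv track=rewrite | github.com/fvschoen/advent-of-code-2025 | python/07/main07.py | part02_count_splits
-- ===== SOURCE A (Python) =====
-- from typing import List
-- import functools
--
-- def part02_count_splits(manifold: List[List[str]]) -> int:
--
--     n, m, j = len(manifold), len(manifold[0]), 0
--     while manifold[0][j] != 'S':
--         j += 1
--
--     @functools.cache
--     def dp(i: int, j: int) -> int:
--
--         if i >= n - 1 or j < 0 or j > m - 1: return 0
--
--         if manifold[i + 1][j] == '^':
--             splits = 1
--             splits += dp(i + 1, j - 1)
--             splits += dp(i + 1, j + 1)
--             return splits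
--         return dp(i + 1, j)
--
--     return dp(0, j) + 1
-- ===== SOURCE B (Python) =====
-- from typing import List
--
--
-- def part02_count_splits(manifold: List[List[str]]) -> int:
--     n, m, j = len(manifold), len(manifold[0]), 0
--     while manifold[0][j] != 'S':
--         j += 1
--
--     # bottom-up: dp[col] = number of splits reachable from cell (i, col); last row is all zeros
--     dp = [0] * m
--     for i in range(n - 2, -1, -1):
--         row_below = manifold[i + 1]
--         new = [0] * m
--         for col in range(m):
--             if row_below[col] == '^':
--                 new[col] = 1 + (dp[col - 1] if col - 1 >= 0 else 0) \
--                              + (dp[col + 1] if col + 1 <= m - 1 else 0)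
--             else:
--                 new[col] = dp[col]
--         dp = new
--     return dp[j] + 1
-- ===== Notes on version B (the rewrite author's own statement) =====
-- stated objective: alternative
-- what changed: Replaces the memoized top-down recursion dp(i,j) by an explicit bottom-up table fill: one rolling row of size m updated for each grid row from bottom to top, then read at the start column.
-- outside the precondition, e.g. on part02_count_splits([['S', '.'], ['^']]): A returns 2, B raises IndexError
import Mathlib
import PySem

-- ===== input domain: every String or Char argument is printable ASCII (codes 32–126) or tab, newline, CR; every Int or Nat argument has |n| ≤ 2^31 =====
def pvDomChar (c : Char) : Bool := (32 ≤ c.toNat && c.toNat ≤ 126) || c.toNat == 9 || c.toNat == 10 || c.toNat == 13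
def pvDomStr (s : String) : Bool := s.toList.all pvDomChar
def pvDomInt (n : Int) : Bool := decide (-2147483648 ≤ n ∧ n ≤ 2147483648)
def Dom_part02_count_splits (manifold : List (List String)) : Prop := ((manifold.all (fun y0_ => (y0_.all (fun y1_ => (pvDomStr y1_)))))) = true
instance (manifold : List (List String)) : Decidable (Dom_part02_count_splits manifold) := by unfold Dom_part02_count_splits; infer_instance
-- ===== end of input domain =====

-- B replaces A's cached top-down recursion by an explicit bottom-up row-by-row DP table (alternative decomposition, same O(n*m) cost).

-- ===== PORT A =====
-- the while-loop 'j += 1 until manifold[0][j] == "S"' as a left-to-right scan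
def pvFindSA : List String → Int
  | [] => 0
  | c :: rest => if c = "S" then 0 else 1 + pvFindSA rest

-- dp(i, j), recursing structurally on the list of rows strictly below row i
-- (the functools.cache only memoizes; the returned value is that of the plain recursion)
def pvDpA (m : Int) : List (List String) → Int → Int
  | [], _ => 0
  | row :: rest, j =>
      if j < 0 ∨ j > m - 1 then 0
      else if (PySem.List.pyGet? row j).getD "" = "^" then
        1 + pvDpA m rest (j - 1) + pvDpA m rest (j + 1)
      else pvDpA m rest j

def part02_count_splits (manifold : List (List String)) : Int :=
  let row0 := manifold.headD []
  let m : Int := row0.length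
  let j := pvFindSA row0
  pvDpA m manifold.tail j + 1

-- ===== PORT B =====
def pvFindSB : List String → Nat
  | [] => 0
  | c :: rest => if c = "S" then 0 else 1 + pvFindSB rest

-- one iteration of B's outer loop: build the new dp row from the row below and the previous dp row
def pvStepRowB (m : Nat) (rowBelow : List String) (dp : List Int) : List Int :=
  (List.range m).map (fun (col : Nat) =>
    if (PySem.List.pyGet? rowBelow ((col : Nat) : Int)).getD "" = "^" then
      1 + (if 1 ≤ col then dp.getD (col - 1) 0 else 0)
        + (if col + 1 ≤ m - 1 then dp.getD (col + 1) 0 else 0)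
    else dp.getD col 0)

def part02_count_splits_alt (manifold : List (List String)) : Int :=
  let row0 := manifold.headD []
  let m := row0.length
  let j := pvFindSB row0
  let dp := manifold.tail.reverse.foldl (fun dp row => pvStepRowB m row dp) (List.replicate m 0)
  dp.getD j 0 + 1

-- ===== PRECONDITION & SPEC =====
-- Pre_ excludes inputs where A raises IndexError (empty grid, no 'S' in the first row) and,
-- in addition, ragged grids whose later rows are shorter than the first row: there B's full-table
-- fill reads every column of each row and raises IndexError while A may return (only visiting
-- reachable cells); see claim.json "cites".
def Pre_part02_count_splits (manifold : List (List String)) : Prop :=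
  "S" ∈ manifold.headD [] ∧ ∀ row ∈ manifold, (manifold.headD []).length ≤ row.length
instance (manifold : List (List String)) : Decidable (Pre_part02_count_splits manifold) := by
  unfold Pre_part02_count_splits; infer_instance
def pvWitness_part02_count_splits : List (List String) := [["S", "."], ["^", "."]]
def Spec_part02_count_splits (manifold : List (List String)) (out : Int) : Prop := out = part02_count_splits_alt manifold
instance (manifold : List (List String)) (out : Int) : Decidable (Spec_part02_count_splits manifold out) := by unfold Spec_part02_count_splits; infer_instance

-- ===== CLAIM (what is proved, stated in full; the proofs are below) =====
def Claim_equal_part02_count_splits : Prop := ∀ (manifold : List (List String)), Dom_part02_count_splits manifold → Pre_part02_count_splits manifold → Spec_part02_count_splits manifold (part02_count_splits manifold)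

-- ===== LEMMAS AND PROOFS =====
-- the dp table built bottom-up over the rows below the current one
def pvBuild (m : Nat) (below : List (List String)) : List Int :=
  below.reverse.foldl (fun dp row => pvStepRowB m row dp) (List.replicate m 0)

lemma pvBuild_cons (m : Nat) (row : List String) (rest : List (List String)) :
    pvBuild m (row :: rest) = pvStepRowB m row (pvBuild m rest) := by
  simp [pvBuild, List.foldl_append]

lemma pvFind_eq (row : List String) : pvFindSA row = (pvFindSB row : Int) := by
  induction row with
  | nil => simp [pvFindSA, pvFindSB]
  | cons c rest ih =>
      by_cases h : c = "S"
      · simp [pvFindSA, pvFindSB, h]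
      · simp [pvFindSA, pvFindSB, h, ih]

lemma pvFind_lt (row : List String) (h : "S" ∈ row) : pvFindSB row < row.length := by
  induction row with
  | nil => simp at h
  | cons c rest ih =>
      by_cases hc : c = "S"
      · simp [pvFindSB, hc]
      · have hm : "S" ∈ rest := by
          rcases List.mem_cons.mp h with h1 | h1
          · exact absurd h1.symm hc
          · exact h1
        have := ih hm
        simp [pvFindSB, hc]
        omega
        
lemma pvStep_getD (m : Nat) (row : List String) (dp : List Int) (c : Nat) (hc : c < m) :
    (pvStepRowB m row dp).getD c 0 =
      if (PySem.List.pyGet? row (c : Int)).getD "" = "^" then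
        1 + (if 1 ≤ c then dp.getD (c - 1) 0 else 0)
          + (if c + 1 ≤ m - 1 then dp.getD (c + 1) 0 else 0)
      else dp.getD c 0 := by
  simp [pvStepRowB, List.getD_eq_getElem?_getD, hc]

lemma pvGetD_replicate (m c : Nat) : (List.replicate m (0 : Int)).getD c 0 = 0 := by
  rw [List.getD_eq_getElem?_getD, List.getElem?_replicate]
  split <;> rfl

lemma pvDp_eq (m : Nat) (below : List (List String)) (j : Int) :
    pvDpA (m : Int) below j =
      if 0 ≤ j ∧ j < (m : Int) then (pvBuild m below).getD j.toNat 0 else 0 := by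
  induction below generalizing j with
  | nil =>
      simp only [pvDpA, pvBuild, List.reverse_nil, List.foldl_nil, pvGetD_replicate]
      split <;> rfl
  | cons row rest ih =>
      by_cases hr : j < 0 ∨ j > (m : Int) - 1
      · have hni : ¬ (0 ≤ j ∧ j < (m : Int)) := by omega
        simp only [pvDpA, if_pos hr, if_neg hni]
      · have hin : 0 ≤ j ∧ j < (m : Int) := by omega
        have hc : j.toNat < m := by omega
        have hj : ((j.toNat : Int)) = j := by omega
        rw [pvBuild_cons]
        simp only [pvDpA, if_neg hr, if_pos hin, pvStep_getD m row _ j.toNat hc, hj]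
        by_cases hcar : (PySem.List.pyGet? row j).getD "" = "^"
        · simp only [if_pos hcar, ih]
          have h1 : (if 0 ≤ j - 1 ∧ j - 1 < (m : Int) then (pvBuild m rest).getD (j-1).toNat 0 else 0)
              = (if 1 ≤ j.toNat then (pvBuild m rest).getD (j.toNat - 1) 0 else 0) := by
            by_cases h2 : 1 ≤ j.toNat
            · have hx : (0 ≤ j - 1 ∧ j - 1 < (m : Int)) := by omega
              have he : (j - 1).toNat = j.toNat - 1 := by omega
              rw [if_pos hx, if_pos h2, he]
            · have hx : ¬ (0 ≤ j - 1 ∧ j - 1 < (m : Int)) := by omega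
              rw [if_neg hx, if_neg h2]
          have h2 : (if 0 ≤ j + 1 ∧ j + 1 < (m : Int) then (pvBuild m rest).getD (j+1).toNat 0 else 0)
              = (if j.toNat + 1 ≤ m - 1 then (pvBuild m rest).getD (j.toNat + 1) 0 else 0) := by
            by_cases h3 : j.toNat + 1 ≤ m - 1
            · have hx : (0 ≤ j + 1 ∧ j + 1 < (m : Int)) := by omega
              have he : (j + 1).toNat = j.toNat + 1 := by omega
              rw [if_pos hx, if_pos h3, he]
            · have hx : ¬ (0 ≤ j + 1 ∧ j + 1 < (m : Int)) := by omega
              rw [if_neg hx, if_neg h3]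
          rw [h1, h2]
        · rw [if_neg hcar, ih, if_pos hin, if_neg hcar]

-- ===== VERDICT (by name: the statement is the Claim_ definition above) =====
theorem part02_count_splits_spec : Claim_equal_part02_count_splits := by
  intro manifold _ hpre
  obtain ⟨hS, -⟩ := hpre
  unfold Spec_part02_count_splits part02_count_splits part02_count_splits_alt
  have hlt : pvFindSB (manifold.headD []) < (manifold.headD []).length := pvFind_lt _ hS
  simp only [pvFind_eq]
  rw [show (manifold.tail.reverse.foldl (fun dp row => pvStepRowB (manifold.headD []).length row dp)
        (List.replicate (manifold.headD []).length 0)) = pvBuild (manifold.headD []).length manifold.tail from rfl,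
    pvDp_eq]
  rw [if_pos ⟨Int.natCast_nonneg _, by exact_mod_cast hlt⟩, Int.toNat_natCast]
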